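-- pv_equiv track=rewrite | github.com/nikolay-e/treemapper | src/treemapper/diffctx/fragments.py | _find_all_headings
-- ===== SOURCE A (Python) =====
-- def _find_all_headings(lines: list[str]) -> list[tuple[int, int]]:
--     headings: list[tuple[int, int]] = []
--     for i, line in enumerate(lines):
--         stripped = line.lstrip()
--         if stripped.startswith("#"):
--             level = 0
--             for ch in stripped:
--                 if ch == "#":
--                     level += 1
--                 else:
--                     break
--             if level <= 6 and (len(stripped) == level or stripped[level] == " "):
--                 headings.append((i + 1, level))
--     return headings
-- ===== SOURCE B (Python) =====
-- def _heading_level(s):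
--     # try the six fixed markers, longest first; at most one can match
--     for n in range(6, 0, -1):
--         marker = "#" * n
--         if s == marker or s.startswith(marker + " "):
--             return n
--     return None
--
--
-- def _find_all_headings(lines: list[str]) -> list[tuple[int, int]]:
--     headings: list[tuple[int, int]] = []
--     for i, line in enumerate(lines):
--         n = _heading_level(line.lstrip())
--         if n is not None:
--             headings.append((i + 1, n))
--     return headings
-- ===== Notes on version B (the rewrite author's own statement) =====
-- stated objective: alternative
-- what changed: Instead of A's character-by-character '#'-counting inner loop plus length/index-arithmetic checks, B tests each lstripped line against the six fixed markers '#'*n (n = 6..1) with s == marker or s.startswith(marker + ' '), via an Option-returning helper.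
import Mathlib
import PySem

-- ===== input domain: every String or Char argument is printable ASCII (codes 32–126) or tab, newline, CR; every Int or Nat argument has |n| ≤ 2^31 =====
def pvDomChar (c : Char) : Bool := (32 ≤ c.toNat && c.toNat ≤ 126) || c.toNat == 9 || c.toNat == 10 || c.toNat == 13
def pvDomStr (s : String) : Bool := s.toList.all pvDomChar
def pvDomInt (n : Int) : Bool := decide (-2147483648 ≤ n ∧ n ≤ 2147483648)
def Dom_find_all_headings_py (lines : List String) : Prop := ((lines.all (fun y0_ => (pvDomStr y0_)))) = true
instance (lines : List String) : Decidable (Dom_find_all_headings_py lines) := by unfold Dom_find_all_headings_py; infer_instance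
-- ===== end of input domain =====

-- B detects a heading by testing the six fixed markers '#'*n (longest first) with s == marker or
-- s.startswith(marker + ' '), instead of A's char-by-char '#'-counting loop plus index checks; objective: alternative.


-- ===== PORT A =====
-- inner loop: 'for ch in stripped: if ch == "#": level += 1 else break'
def pvCountHash : List Char → Int → Int
  | [], level => level
  | c :: cs, level => if c = '#' then pvCountHash cs (level + 1) else level

def find_all_headings_py (lines : List String) : List (Int × Int) :=
  (PySem.List.enumerate lines).foldl (fun headings p =>
    let stripped := PySem.Str.lstrip p.2
    if PySem.Str.startswith stripped "#" then
      let level := pvCountHash stripped.toList 0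
      -- 'stripped[level] == " "' compares a length-1 string; exact as an Option Char comparison
      if level ≤ 6 ∧ (((PySem.Str.len stripped : Int) = level) ∨ PySem.Str.pyGet? stripped level = some ' ')
      then headings ++ [(p.1 + 1, level)]
      else headings
    else headings) []

-- ===== PORT B =====
-- '"#" * n', 's == marker', 's.startswith(marker + " ")' ported on the char-list side
-- (String equality/append are opaque to the kernel; list equality/append are exact)
def pvFirstMatch (s : List Char) : List Int → Option Int
  | [] => none
  | n :: ns =>
    let marker := List.replicate n.toNat '#'
    if (s == marker || PySem.Chars.startswith s (marker ++ [' '])) then some n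
    else pvFirstMatch s ns

def pvHeadingLevel (s : String) : Option Int :=
  pvFirstMatch s.toList (PySem.List.pyRange 6 0 (-1))

def find_all_headings_py_alt (lines : List String) : List (Int × Int) :=
  (PySem.List.enumerate lines).foldl (fun headings p =>
    match pvHeadingLevel (PySem.Str.lstrip p.2) with
    | some n => headings ++ [(p.1 + 1, n)]
    | none => headings) []

-- ===== PRECONDITION & SPEC =====
def Spec_find_all_headings_py (lines : List String) (out : List (Int × Int)) : Prop := out = find_all_headings_py_alt lines
instance (lines : List String) (out : List (Int × Int)) : Decidable (Spec_find_all_headings_py lines out) := by unfold Spec_find_all_headings_py; infer_instance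

-- ===== CLAIM (what is proved, stated in full; the proofs are below) =====
def Claim_equal_find_all_headings_py : Prop := ∀ (lines : List String), Dom_find_all_headings_py lines → Spec_find_all_headings_py lines (find_all_headings_py lines)

-- ===== LEMMAS AND PROOFS =====

-- number of leading '#' characters (proof-side characterisation of A's inner loop)
def pvHn : List Char → Nat
  | [] => 0
  | c :: cs => if c = '#' then pvHn cs + 1 else 0

theorem pvCountHash_eq (cs : List Char) : ∀ level : Int, pvCountHash cs level = level + (pvHn cs : Int) := by
  induction cs with
  | nil => intro level; simp [pvCountHash, pvHn]
  | cons c cs ih =>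
    intro level
    by_cases h : c = '#' <;> simp [pvCountHash, pvHn, h, ih] <;> ring

theorem pvMatch_iff (n : Nat) (cs : List Char) :
    (cs == List.replicate n '#' || PySem.Chars.startswith cs (List.replicate n '#' ++ [' '])) = true
    ↔ (pvHn cs = n ∧ (cs.length = n ∨ cs[n]? = some ' ')) := by
  induction n generalizing cs with
  | zero =>
    cases cs with
    | nil => simp [pvHn]
    | cons c cs =>
      by_cases h : c = '#' <;>
        simp [pvHn, h, PySem.Chars.startswith_iff, List.prefix_cons_iff] <;> tauto
  | succ n ih =>
    cases cs with
    | nil => simp [pvHn, PySem.Chars.startswith_iff, List.replicate_succ]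
    | cons c cs =>
      by_cases h : c = '#'
      · simpa [pvHn, h, List.replicate_succ, PySem.Chars.startswith_iff, List.prefix_cons_iff] using ih cs
      · simp [pvHn, h, List.replicate_succ, PySem.Chars.startswith_iff, List.prefix_cons_iff]
        intro hc; exact absurd hc.symm h

theorem pvFirstMatch_cons (n : Int) (ns : List Int) (cs : List Char) :
    pvFirstMatch cs (n :: ns) =
      if pvHn cs = n.toNat ∧ (cs.length = n.toNat ∨ cs[n.toNat]? = some ' ')
      then some n else pvFirstMatch cs ns := by
  by_cases hm : (cs == List.replicate n.toNat '#' ||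
      PySem.Chars.startswith cs (List.replicate n.toNat '#' ++ [' '])) = true
  · rw [pvFirstMatch, if_pos hm, if_pos ((pvMatch_iff _ _).mp hm)]
  · rw [pvFirstMatch, if_neg hm, if_neg (fun hc => hm ((pvMatch_iff _ _).mpr hc))]

theorem pvFirstMatch_eq (cs : List Char) :
    pvFirstMatch cs (PySem.List.pyRange 6 0 (-1)) =
      if 1 ≤ pvHn cs ∧ pvHn cs ≤ 6 ∧ (cs.length = pvHn cs ∨ cs[pvHn cs]? = some ' ')
      then some (pvHn cs : Int) else none := by
  have hr : PySem.List.pyRange 6 0 (-1) = [6, 5, 4, 3, 2, 1] := by decide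
  rw [hr, pvFirstMatch_cons 6, pvFirstMatch_cons 5,
    pvFirstMatch_cons 4, pvFirstMatch_cons 3,
    pvFirstMatch_cons 2, pvFirstMatch_cons 1]
  simp only [show ((6:Int).toNat) = 6 from rfl, show ((5:Int).toNat) = 5 from rfl,
    show ((4:Int).toNat) = 4 from rfl, show ((3:Int).toNat) = 3 from rfl,
    show ((2:Int).toNat) = 2 from rfl, show ((1:Int).toNat) = 1 from rfl]
  by_cases h : 1 ≤ pvHn cs ∧ pvHn cs ≤ 6 ∧ (cs.length = pvHn cs ∨ cs[pvHn cs]? = some ' ')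
  · obtain ⟨h1, h6, hc⟩ := h
    interval_cases hk : (pvHn cs) <;> simp_all
  · rw [if_neg h]
    have hX : ∀ n : Nat, 1 ≤ n → n ≤ 6 →
        ¬ (pvHn cs = n ∧ (cs.length = n ∨ cs[n]? = some ' ')) := by
      intro n h1 h6 hcond
      exact h ⟨by rw [hcond.1]; exact h1, by rw [hcond.1]; exact h6, by rw [hcond.1]; exact hcond.2⟩
    rw [if_neg (hX 6 (by norm_num) (by norm_num)), if_neg (hX 5 (by norm_num) (by norm_num)),
      if_neg (hX 4 (by norm_num) (by norm_num)), if_neg (hX 3 (by norm_num) (by norm_num)),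
      if_neg (hX 2 (by norm_num) (by norm_num)), if_neg (hX 1 (by norm_num) (by norm_num)),
      pvFirstMatch]

-- first char is '#' iff at least one leading '#'
theorem pvStarts (cs : List Char) : PySem.Chars.startswith cs ['#'] = true ↔ 1 ≤ pvHn cs := by
  cases cs with
  | nil => simp [pvHn, PySem.Chars.startswith_iff]
  | cons c cs =>
    by_cases h : c = '#'
    · simp [pvHn, h, PySem.Chars.startswith_iff, List.cons_prefix_cons]
    · simp [pvHn, h, PySem.Chars.startswith_iff, List.cons_prefix_cons]
      exact fun hc => h hc.symm

-- per-line agreement: A's branch computes exactly B's heading level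
theorem pv_per_line (s : String) :
    (if PySem.Str.startswith s "#" then
       (if pvCountHash s.toList 0 ≤ 6 ∧ (((PySem.Str.len s : Int) = pvCountHash s.toList 0) ∨
            PySem.Str.pyGet? s (pvCountHash s.toList 0) = some ' ')
        then some (pvCountHash s.toList 0) else none)
     else none) = pvHeadingLevel s := by
  unfold pvHeadingLevel
  rw [pvFirstMatch_eq s.toList]
  have hcnt : pvCountHash s.toList 0 = (pvHn s.toList : Int) := by rw [pvCountHash_eq]; ring
  rw [hcnt]
  have e0 : (PySem.Str.startswith s "#" = true) ↔ 1 ≤ pvHn s.toList := by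
    rw [PySem.Str.startswith_eq]; exact pvStarts s.toList
  have e1 : (((pvHn s.toList : Nat) : Int) ≤ 6) ↔ pvHn s.toList ≤ 6 := by exact_mod_cast Iff.rfl
  have e2 : ((PySem.Str.len s : Int) = ((pvHn s.toList : Nat) : Int)) ↔ s.toList.length = pvHn s.toList := by
    rw [PySem.Str.len_eq]; exact_mod_cast Iff.rfl
  have e3 : PySem.Str.pyGet? s ((pvHn s.toList : Nat) : Int) = s.toList[pvHn s.toList]? := by simp
  simp only [e0, e1, e2, e3]
  split_ifs <;> tauto

theorem pv_fold_eq (l : List (Int × String)) (acc : List (Int × Int)) :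
    l.foldl (fun headings p =>
      let stripped := PySem.Str.lstrip p.2
      if PySem.Str.startswith stripped "#" then
        let level := pvCountHash stripped.toList 0
        if level ≤ 6 ∧ (((PySem.Str.len stripped : Int) = level) ∨ PySem.Str.pyGet? stripped level = some ' ')
        then headings ++ [(p.1 + 1, level)]
        else headings
      else headings) acc
    = l.foldl (fun headings p =>
      match pvHeadingLevel (PySem.Str.lstrip p.2) with
      | some n => headings ++ [(p.1 + 1, n)]
      | none => headings) acc := by
  induction l generalizing acc with
  | nil => rfl
  | cons p l ih =>
    simp only [List.foldl_cons]
    rw [← ih]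
    congr 1
    rw [← pv_per_line (PySem.Str.lstrip p.2)]
    split_ifs <;> rfl

-- ===== VERDICT (by name: the statement is the Claim_ definition above) =====
theorem find_all_headings_py_spec : Claim_equal_find_all_headings_py := by
  intro lines _
  unfold Spec_find_all_headings_py find_all_headings_py find_all_headings_py_alt
  exact pv_fold_eq _ _
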